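-- pv_equiv track=rewrite | github.com/tartunian/mod-web | scripts/extract_signals.py | parse_instruments
-- ===== SOURCE A (Python) =====
-- from typing import Dict, List, Optional, Tuple
--
-- INSTRUMENT_PRESETS: Dict[str, Dict[str, object]] = {
--     "keys": {
--         "aliases": ["keys", "keyboard", "piano", "synth"],
--         "bands": [(60, 250, 0.5), (250, 2000, 0.9), (2000, 7000, 0.5)],
--         "mix": (0.6, 0.1, 0.3),  # harmonic, onset, rms
--     },
--     "guitar": {
--         "aliases": ["guitar", "guitars"],
--         "bands": [(90, 350, 0.5), (350, 3000, 1.0), (3000, 6000, 0.4)],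
--         "mix": (0.65, 0.2, 0.15),
--     },
--     "brass": {
--         "aliases": ["brass", "horn", "horns", "trumpet", "trombone", "sax"],
--         "bands": [(120, 600, 0.9), (600, 2200, 1.0), (2200, 4500, 0.4)],
--         "mix": (0.45, 0.35, 0.2),
--     },
-- }
--
-- def parse_instruments(spec: str) -> List[str]:
--     if not spec:
--         return []
--     requested = [s.strip().lower() for s in spec.split(",") if s.strip()]
--     canonical: List[str] = []
--     for name in requested:
--         mapped = None
--         for key, preset in INSTRUMENT_PRESETS.items():
--             aliases = preset.get("aliases", [])
--             if name == key or name in aliases: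
--                 mapped = key
--                 break
--         if mapped and mapped not in canonical:
--             canonical.append(mapped)
--     return canonical
-- ===== SOURCE B (Python) =====
-- from typing import Dict, List, Optional, Tuple
--
-- INSTRUMENT_PRESETS: Dict[str, Dict[str, object]] = {
--     "keys": {
--         "aliases": ["keys", "keyboard", "piano", "synth"],
--         "bands": [(60, 250, 0.5), (250, 2000, 0.9), (2000, 7000, 0.5)],
--         "mix": (0.6, 0.1, 0.3),
--     },
--     "guitar": {
--         "aliases": ["guitar", "guitars"],
--         "bands": [(90, 350, 0.5), (350, 3000, 1.0), (3000, 6000, 0.4)],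
--         "mix": (0.65, 0.2, 0.15),
--     },
--     "brass": {
--         "aliases": ["brass", "horn", "horns", "trumpet", "trombone", "sax"],
--         "bands": [(120, 600, 0.9), (600, 2200, 1.0), (2200, 4500, 0.4)],
--         "mix": (0.45, 0.35, 0.2),
--     },
-- }
--
-- # Index built once: every preset key and every alias maps to its canonical key.
-- _ALIAS_TO_KEY: Dict[str, str] = {}
-- for _key, _preset in INSTRUMENT_PRESETS.items():
--     _ALIAS_TO_KEY[_key] = _key
--     for _alias in _preset.get("aliases", []):
--         _ALIAS_TO_KEY[_alias] = _key
--
-- def parse_instruments(spec: str) -> List[str]: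
--     canonical: List[str] = []
--     for piece in spec.split(","):
--         name = piece.strip().lower()
--         mapped = _ALIAS_TO_KEY.get(name)
--         if mapped and mapped not in canonical:
--             canonical.append(mapped)
--     return canonical
-- ===== Notes on version B (the rewrite author's own statement) =====
-- stated objective: idiomatic
-- what changed: Builds a module-level alias-to-canonical-key dict once from INSTRUMENT_PRESETS; parse_instruments becomes a single pass over the comma-separated pieces doing one dict lookup each, eliminating A's separate filtering comprehension and its nested scan over presets and alias lists.
import Mathlib
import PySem

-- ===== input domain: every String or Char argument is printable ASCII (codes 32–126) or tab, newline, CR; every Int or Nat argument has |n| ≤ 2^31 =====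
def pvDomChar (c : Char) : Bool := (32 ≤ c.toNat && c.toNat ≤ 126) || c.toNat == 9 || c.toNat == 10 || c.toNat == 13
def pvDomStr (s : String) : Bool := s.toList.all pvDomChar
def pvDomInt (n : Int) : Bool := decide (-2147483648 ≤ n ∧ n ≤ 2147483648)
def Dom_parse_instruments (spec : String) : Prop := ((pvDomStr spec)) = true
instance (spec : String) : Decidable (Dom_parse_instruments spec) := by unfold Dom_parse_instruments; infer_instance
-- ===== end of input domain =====

-- B replaces A's pre-filter comprehension + nested preset/alias scan by an alias→key dict built once
-- from the presets and a single lookup per comma-separated piece (idiomatic; same results).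
-- INSTRUMENT_PRESETS' "bands"/"mix" entries are floats but are never read by parse_instruments,
-- so the ports carry only the (key, aliases) part of the constant.

-- ===== PORT A =====
-- INSTRUMENT_PRESETS restricted to the fields parse_instruments reads: (key, aliases)
def pvPresets : List (String × List String) :=
  [("keys",   ["keys", "keyboard", "piano", "synth"]),
   ("guitar", ["guitar", "guitars"]),
   ("brass",  ["brass", "horn", "horns", "trumpet", "trombone", "sax"])]

-- A's inner loop: first preset whose key or alias list matches name, with `break`
def pvFindKey (name : String) : List (String × List String) → Option String
  | [] => none
  | (key, aliases) :: rest =>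
      if name = key ∨ name ∈ aliases then some key else pvFindKey name rest

-- A's loop body: `if mapped and mapped not in canonical: canonical.append(mapped)`
def pvStep (canonical : List String) (name : String) : List String :=
  match pvFindKey name pvPresets with
  | some key => if key ≠ "" ∧ key ∉ canonical then canonical ++ [key] else canonical
  | none => canonical

def parse_instruments (spec : String) : List String :=
  if spec = "" then []
  else
    let requested :=
      (((PySem.Str.split? spec ",").getD []).filter (fun s => PySem.Str.strip s ≠ "")).map
        (fun s => PySem.Str.lower (PySem.Str.strip s))
    requested.foldl pvStep []

-- ===== PORT B =====
-- the module-level index of Source B: every preset key and every alias ↦ canonical key, built once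
def pvAliasToKey : PySem.Dict String String :=
  pvPresets.foldl
    (fun d kp => kp.2.foldl (fun d a => d.insert a kp.1) (d.insert kp.1 kp.1))
    PySem.Dict.empty

-- Source B's loop body: one dict lookup, then the same truthiness + dedup guard
def pvStepAlt (canonical : List String) (piece : String) : List String :=
  match pvAliasToKey.get? (PySem.Str.lower (PySem.Str.strip piece)) with
  | some key => if key ≠ "" ∧ key ∉ canonical then canonical ++ [key] else canonical
  | none => canonical

def parse_instruments_alt (spec : String) : List String :=
  ((PySem.Str.split? spec ",").getD []).foldl pvStepAlt []

-- ===== PRECONDITION & SPEC =====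
def Spec_parse_instruments (spec : String) (out : List String) : Prop := out = parse_instruments_alt spec
instance (spec : String) (out : List String) : Decidable (Spec_parse_instruments spec out) := by unfold Spec_parse_instruments; infer_instance

-- ===== CLAIM (what is proved, stated in full; the proofs are below) =====
def Claim_equal_parse_instruments : Prop := ∀ (spec : String), Dom_parse_instruments spec → Spec_parse_instruments spec (parse_instruments spec)

-- ===== LEMMAS AND PROOFS =====

-- the dict Source B builds, as a literal
lemma pvDict_lit : pvAliasToKey = PySem.Dict.mk
    [("keys","keys"),("keyboard","keys"),("piano","keys"),("synth","keys"),
     ("guitar","guitar"),("guitars","guitar"),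
     ("brass","brass"),("horn","brass"),("horns","brass"),("trumpet","brass"),
     ("trombone","brass"),("sax","brass")] := by rfl

-- the index lookup agrees with A's nested scan on EVERY name
lemma pvLookup_eq (name : String) : pvFindKey name pvPresets = pvAliasToKey.get? name := by
  rw [pvDict_lit]
  by_cases h1 : name = "keys"
  · subst h1; decide
  by_cases h2 : name = "keyboard"
  · subst h2; decide
  by_cases h3 : name = "piano"
  · subst h3; decide
  by_cases h4 : name = "synth"
  · subst h4; decide
  by_cases h5 : name = "guitar"
  · subst h5; decide
  by_cases h6 : name = "guitars"
  · subst h6; decide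
  by_cases h7 : name = "brass"
  · subst h7; decide
  by_cases h8 : name = "horn"
  · subst h8; decide
  by_cases h9 : name = "horns"
  · subst h9; decide
  by_cases h10 : name = "trumpet"
  · subst h10; decide
  by_cases h11 : name = "trombone"
  · subst h11; decide
  by_cases h12 : name = "sax"
  · subst h12; decide
  simp [pvFindKey, pvPresets, beq_iff_eq, PySem.Dict.get?, h1, h2, h3, h4, h5, h6,
    h7, h8, h9, h10, h11, h12, Ne.symm h1, Ne.symm h2, Ne.symm h3, Ne.symm h4, Ne.symm h5,
    Ne.symm h6, Ne.symm h7, Ne.symm h8, Ne.symm h9, Ne.symm h10, Ne.symm h11, Ne.symm h12]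

lemma pvStepAlt_eq (c : List String) (p : String) :
    pvStepAlt c p = pvStep c (PySem.Str.lower (PySem.Str.strip p)) := by
  simp only [pvStepAlt, pvStep, pvLookup_eq]

lemma pvLower_empty : PySem.Str.lower "" = "" := by decide

lemma pvFind_empty : pvFindKey "" pvPresets = none := by decide

lemma pvStep_empty (acc : List String) : pvStep acc "" = acc := by
  simp [pvStep, pvFind_empty]

-- A's filter-then-map pass over the pieces equals B's single pass: empty pieces are no-ops
lemma pvFold_eq (ss acc : List String) :
    (((ss.filter (fun s => PySem.Str.strip s ≠ "")).map
        (fun s => PySem.Str.lower (PySem.Str.strip s))).foldl pvStep acc)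
    = ss.foldl (fun canonical piece => pvStep canonical (PySem.Str.lower (PySem.Str.strip piece))) acc := by
  induction ss generalizing acc with
  | nil => simp
  | cons s rest ih =>
    by_cases h : PySem.Str.strip s = ""
    · rw [List.filter_cons, if_neg (by simp [h]), List.foldl_cons, h, pvLower_empty, pvStep_empty, ih]
    · rw [List.filter_cons, if_pos (by simp [h]), List.map_cons, List.foldl_cons, List.foldl_cons, ih]

-- ===== VERDICT (by name: the statement is the Claim_ definition above) =====
theorem parse_instruments_spec : Claim_equal_parse_instruments := by
  intro spec _
  unfold Spec_parse_instruments parse_instruments parse_instruments_alt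
  have hs : pvStepAlt = fun canonical piece =>
      pvStep canonical (PySem.Str.lower (PySem.Str.strip piece)) := by
    funext c p; exact pvStepAlt_eq c p
  by_cases h : spec = ""
  · subst h; decide
  · rw [if_neg h, hs]
    exact pvFold_eq _ _
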